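-- pv_equiv track=rewrite | github.com/ther8t/leetcode | 227_basic-calculator-ii.py | calculate
-- ===== SOURCE A (Python) =====
-- def calculate(s: str) -> int:
--     n = len(s)
--     ans = 0
--     ptr = 0
--     builder = ""
--     while ptr < n and s[ptr] != "*" and s[ptr] != "/" and s[ptr] != "+" and s[ptr] != "-":
--         builder += s[ptr]
--         ptr += 1
--     num1 = int(builder.strip())
--     last_number = num1
--     ans += num1
--
--     while ptr < n:
--         ptr2 = ptr
--         num1 = last_number
--         operator = s[ptr2]
--         ptr2 += 1
--         builder = ""
--         while ptr2 < n and s[ptr2] != "*" and s[ptr2] != "/" and s[ptr2] != "+" and s[ptr2] != "-":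
--             builder += s[ptr2]
--             ptr2 += 1
--         num2 = int(builder.strip())
--         if operator == "/":
--             ans -= last_number
--             ans += ((num1 // abs(num1)) * (abs(num1) // num2) if num1 != 0 and num2 != 0 else 0)
--             last_number = ((num1 // abs(num1)) * (abs(num1) // num2) if num1 != 0 and num2 != 0 else 0)
--         elif operator == "*":
--             ans -= last_number
--             ans += (num1 * num2)
--             last_number = (num1 * num2)
--         elif operator == "-":
--             ans += (-num2)
--             last_number = -num2
--         elif operator == "+":
--             ans += (num2)
--             last_number = num2
--         ptr = ptr2
--
--     return ans
-- ===== SOURCE B (Python) =====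
-- def calculate(s: str) -> int:
--     # Tokenize once into [num, op, num, op, ..., num], then evaluate with an
--     # explicit stack: +/- push (signed) numbers, *// combine with the top; the
--     # answer is the sum of the stack.
--     tokens = []
--     cur = ""
--     for ch in s:
--         if ch in "+-*/":
--             tokens.append(cur)
--             tokens.append(ch)
--             cur = ""
--         else:
--             cur += ch
--     tokens.append(cur)
--
--     stack = [int(tokens[0].strip())]
--     for j in range(1, len(tokens), 2):
--         op = tokens[j]
--         num = int(tokens[j + 1].strip())
--         if op == "+":
--             stack.append(num)
--         elif op == "-":
--             stack.append(-num)
--         elif op == "*":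
--             stack.append(stack.pop() * num)
--         else:
--             t = stack.pop()
--             stack.append(0 if t == 0 or num == 0 else (t // abs(t)) * (abs(t) // num))
--     return sum(stack)
-- ===== Notes on version B (the rewrite author's own statement) =====
-- stated objective: idiomatic
-- what changed: B tokenizes the string once into [number, op, number, ...] and evaluates with an explicit stack (push for +/-, combine with the popped top for */), returning sum(stack), instead of A's pointer-rescanning loop that maintains a running total plus last_number bookkeeping.
import Mathlib
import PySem

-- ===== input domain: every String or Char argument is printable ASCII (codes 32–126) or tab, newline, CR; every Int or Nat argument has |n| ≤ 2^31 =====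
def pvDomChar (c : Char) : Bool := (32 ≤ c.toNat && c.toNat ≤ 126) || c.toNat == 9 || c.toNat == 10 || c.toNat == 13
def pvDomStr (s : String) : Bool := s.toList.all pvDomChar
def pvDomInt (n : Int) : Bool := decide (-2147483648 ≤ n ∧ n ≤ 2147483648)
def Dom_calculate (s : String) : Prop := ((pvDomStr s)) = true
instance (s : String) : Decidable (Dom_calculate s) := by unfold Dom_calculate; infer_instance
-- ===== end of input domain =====

-- B replaces A's pointer/rescan evaluator (running sum + last_number bookkeeping) by a
-- one-pass tokenizer followed by a stack evaluator whose result is the sum of the stack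
-- (objective: idiomatic/alternative; same cost).

-- ===== PORT A =====
def pvIsOp (c : Char) : Bool := c == '*' || c == '/' || c == '+' || c == '-'

-- inner while: collect chars of the builder until an operator (or end)
def pvScan : List Char → List Char × List Char
  | [] => ([], [])
  | c :: r =>
    if pvIsOp c then ([], c :: r)
    else
      let p := pvScan r
      (c :: p.1, p.2)

theorem pvScan_len (l : List Char) : (pvScan l).2.length ≤ l.length := by
  induction l with
  | nil => simp [pvScan]
  | cons c r ih =>
    simp only [pvScan]
    split
    · simp
    · simpa using Nat.le_succ_of_le ih

-- outer while of A: state (ans, last_number), scanning operator + next number each round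
def pvLoopA : List Char → Int → Int → Int
  | [], ans, _ => ans
  | op :: rest, ans, last =>
    let p := pvScan rest
    let num2 := (PySem.Int.ofChars? (PySem.Chars.strip p.1)).getD 0
    let num1 := last
    if op == '/' then
      let v := if num1 ≠ 0 ∧ num2 ≠ 0 then
        PySem.Int.floordiv num1 |num1| * PySem.Int.floordiv |num1| num2 else 0
      pvLoopA p.2 (ans - last + v) v
    else if op == '*' then pvLoopA p.2 (ans - last + num1 * num2) (num1 * num2)
    else if op == '-' then pvLoopA p.2 (ans + (-num2)) (-num2)
    else if op == '+' then pvLoopA p.2 (ans + num2) num2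
    else pvLoopA p.2 ans last
termination_by l => l.length
decreasing_by all_goals
  exact Nat.lt_succ_of_le (pvScan_len rest)

def calculate (s : String) : Int :=
  let l := s.toList
  let p := pvScan l
  let num1 := (PySem.Int.ofChars? (PySem.Chars.strip p.1)).getD 0
  pvLoopA p.2 (0 + num1) num1

-- ===== PORT B =====
-- tokenizer: one fold over the characters, flushing the current builder at each operator
def pvTokenize (l : List Char) : List (List Char) :=
  let p := l.foldl
    (fun (st : List (List Char) × List Char) ch =>
      if pvIsOp ch then (st.1 ++ [st.2, [ch]], []) else (st.1, st.2 ++ [ch]))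
    ([], [])
  p.1 ++ [p.2]

-- stack evaluator over the (op, number) pairs of the token list
def pvRunB : List (List Char) → List Int → List Int
  | [], st => st
  | [_], st => st   -- token lists produced by pvTokenize have odd length; unreachable
  | op :: numTok :: rest, st =>
    let num := (PySem.Int.ofChars? (PySem.Chars.strip numTok)).getD 0
    if op == ['+'] then pvRunB rest (st ++ [num])
    else if op == ['-'] then pvRunB rest (st ++ [-num])
    else if op == ['*'] then
      let t := st.getLast?.getD 0
      pvRunB rest (st.dropLast ++ [t * num])
    else
      let t := st.getLast?.getD 0
      pvRunB rest (st.dropLast ++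
        [if t = 0 ∨ num = 0 then 0 else
          PySem.Int.floordiv t |t| * PySem.Int.floordiv |t| num])

def calculate_alt (s : String) : Int :=
  match pvTokenize s.toList with
  | [] => 0   -- unreachable: pvTokenize always returns at least one token
  | t0 :: rest =>
    (pvRunB rest [(PySem.Int.ofChars? (PySem.Chars.strip t0)).getD 0]).sum

-- ===== PRECONDITION & SPEC =====
-- the maximal operator-free segments of s (Python's int() is applied to each of them)
def pvSegs : List Char → List (List Char)
  | [] => [[]]
  | c :: r =>
    if pvIsOp c then [] :: pvSegs r
    else
      match pvSegs r with
      | [] => [[c]]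
      | sg :: ss => (c :: sg) :: ss

-- Pre_ excludes exactly the inputs where A raises ValueError: some segment between
-- operators, once stripped, is not a valid int literal (empty or containing non-digits).
def Pre_calculate (s : String) : Prop :=
  ∀ t ∈ pvSegs s.toList, (PySem.Int.ofChars? (PySem.Chars.strip t)).isSome = true
instance (s : String) : Decidable (Pre_calculate s) := by unfold Pre_calculate; infer_instance

def pvWitness_calculate : String := " 12 + 3*4 - 14/4 "

def Spec_calculate (s : String) (out : Int) : Prop := out = calculate_alt s
instance (s : String) (out : Int) : Decidable (Spec_calculate s out) := by
  unfold Spec_calculate; infer_instance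

-- ===== CLAIM =====
def Claim_equal_calculate : Prop :=
  ∀ (s : String), Dom_calculate s → Pre_calculate s → Spec_calculate s (calculate s)

-- ===== LEMMAS AND PROOFS =====
-- recursive description of the tokenizer
def pvTokRec (cur : List Char) : List Char → List (List Char)
  | [] => [cur]
  | c :: r => if pvIsOp c then cur :: [c] :: pvTokRec [] r else pvTokRec (cur ++ [c]) r

theorem pvTokenize_foldl (l : List Char) : ∀ (toks : List (List Char)) (cur : List Char),
    (let p := l.foldl
      (fun (st : List (List Char) × List Char) ch =>
        if pvIsOp ch then (st.1 ++ [st.2, [ch]], []) else (st.1, st.2 ++ [ch]))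
      (toks, cur)
     p.1 ++ [p.2]) = toks ++ pvTokRec cur l := by
  induction l with
  | nil => intro toks cur; simp [pvTokRec]
  | cons c r ih =>
    intro toks cur
    by_cases h : pvIsOp c = true
    · simp only [List.foldl_cons, h, if_pos, pvTokRec, ih]
      simp
    · simp only [List.foldl_cons, h, pvTokRec, ih]
      simp

theorem pvTokenize_eq (l : List Char) : pvTokenize l = pvTokRec [] l := by
  simpa [pvTokenize] using pvTokenize_foldl l [] []

theorem pvTokRec_step (l : List Char) : ∀ cur,
    pvTokRec cur l = (cur ++ (pvScan l).1) ::
      (match (pvScan l).2 with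
       | [] => []
       | c :: r => [c] :: pvTokRec [] r) := by
  induction l with
  | nil => intro cur; simp [pvTokRec, pvScan]
  | cons c r ih =>
    intro cur
    by_cases h : pvIsOp c = true
    · simp [pvTokRec, pvScan, h]
    · simp only [pvTokRec, pvScan, h, if_neg, Bool.false_eq_true, not_false_iff, ih]
      simp

theorem pvScan_rest (l : List Char) :
    (pvScan l).2 = [] ∨ ∃ c r, (pvScan l).2 = c :: r ∧ pvIsOp c = true := by
  induction l with
  | nil => left; simp [pvScan]
  | cons c r ih =>
    by_cases h : pvIsOp c = true
    · right; exact ⟨c, r, by simp [pvScan, h], h⟩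
    · simpa [pvScan, h] using ih

-- helper used only by the proofs: the token tail for a remainder of the input
def pvToksOf : List Char → List (List Char)
  | [] => []
  | c :: r => [c] :: pvTokRec [] r

theorem pvToksOf_match (l : List Char) :
    (match l with
     | [] => ([] : List (List Char))
     | c :: r => [c] :: pvTokRec [] r) = pvToksOf l := by
  cases l <;> simp [pvToksOf]

theorem pvMain : ∀ (n : ℕ) (l : List Char) (st : List Int) (last : Int),
    l.length ≤ n →
    ((l = []) ∨ ∃ c r, l = c :: r ∧ pvIsOp c = true) →
    (pvRunB (pvToksOf l) (st ++ [last])).sum = pvLoopA l (st.sum + last) last := by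
  intro n
  induction n with
  | zero =>
    intro l st last hn hop
    have : l = [] := List.length_eq_zero_iff.mp (Nat.le_zero.mp hn)
    subst this
    simp [pvToksOf, pvRunB, pvLoopA]
  | succ n ih =>
    intro l st last hn hop
    rcases hop with h | ⟨op, rest, rfl, hop⟩
    · subst h; simp [pvToksOf, pvRunB, pvLoopA]
    · simp only [pvToksOf]
      rw [pvTokRec_step, pvToksOf_match]
      have hlen : (pvScan rest).2.length ≤ n := by
        have := pvScan_len rest; simp at hn; omega
      have hIH := fun st' last' => ih (pvScan rest).2 st' last' hlen (pvScan_rest rest)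
      simp only [pvIsOp, Bool.or_eq_true, beq_iff_eq] at hop
      set num := (PySem.Int.ofChars? (PySem.Chars.strip (pvScan rest).1)).getD 0 with hnum
      rcases hop with ((rfl | rfl) | rfl) | rfl
      · -- '*'
        simp only [pvRunB, pvLoopA]
        norm_num
        rw [if_neg (by decide : ¬('*' = '+')), if_neg (by decide : ¬('*' = '-')),
            if_neg (by decide : ¬('*' = '/'))]
        exact hIH st (last * num)
      · -- '/'
        simp only [pvRunB, pvLoopA]
        norm_num
        rw [if_neg (by decide : ¬('/' = '+')), if_neg (by decide : ¬('/' = '-')),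
            if_neg (by decide : ¬('/' = '*'))]
        have hite : (if last = 0 ∨ num = 0 then (0 : Int)
              else PySem.Int.floordiv last |last| * PySem.Int.floordiv |last| num)
            = (if ¬last = 0 ∧ ¬num = 0 then
                PySem.Int.floordiv last |last| * PySem.Int.floordiv |last| num else 0) := by
          by_cases h0 : last = 0 ∨ num = 0
          · rw [if_pos h0, if_neg (by tauto)]
          · rw [if_neg h0, if_pos (by tauto)]
        rw [hite]
        exact hIH st _
      · -- '+'
        simp only [pvRunB, pvLoopA]
        norm_num
        have := hIH (st ++ [last]) num
        simpa [add_assoc] using this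
      · -- '-'
        simp only [pvRunB, pvLoopA]
        norm_num
        rw [if_neg (by decide : ¬('-' = '+'))]
        have := hIH (st ++ [last]) (-num)
        simpa [add_assoc] using this

-- ===== VERDICT =====
theorem calculate_spec : Claim_equal_calculate := by
  intro s _ _
  unfold Spec_calculate calculate calculate_alt
  rw [pvTokenize_eq, pvTokRec_step]
  rcases pvScan_rest s.toList with h | ⟨c, r, h, hc⟩ <;> rw [h]
  · simp [pvRunB, pvLoopA, h]
  · have := pvMain (r.length + 1) (c :: r) []
      ((PySem.Int.ofChars? (PySem.Chars.strip (pvScan s.toList).1)).getD 0)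
      (by simp) (Or.inr ⟨c, r, rfl, hc⟩)
    simp only [pvToksOf, List.nil_append, List.sum_nil, zero_add] at this
    simp only [h, zero_add]
    exact this.symm
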